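-- pv_equiv track=rewrite | github.com/tommytim0515/advent-of-code-2021 | 15_chiton/chiton.py | compute_full_map
-- ===== SOURCE A (Python) =====
-- from typing import List, Tuple
--
-- def compute_full_map(original_map: List[List[int]]) -> List[List[int]]:
--     if len(original_map) == 0:
--         return []
--     num_rows = len(original_map)
--     num_cols = len(original_map[0])
--     new_map = [[0 for _ in range(5*num_cols)]
--                for _ in range(5*num_rows)]
--     for i in range(5):
--         for j in range(5):
--             for y in range(num_rows):
--                 for x in range(num_cols):
--                     new_val = original_map[y][x] + i + j
--                     if new_val > 9:
--                         new_val -= 9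
--                     new_map[y+i*num_rows][x+j * num_cols] = new_val
--     return new_map
-- ===== SOURCE B (Python) =====
-- from typing import List, Tuple
--
-- def compute_full_map(original_map: List[List[int]]) -> List[List[int]]:
--     if len(original_map) == 0:
--         return []
--     num_rows = len(original_map)
--     num_cols = len(original_map[0])
--     # memo table: for each original row, its 9 possible shifted versions (offsets 0..8)
--     shifted = [[[v + o - 9 if v + o > 9 else v + o for v in row[:num_cols]]
--                 for o in range(9)]
--                for row in original_map]
--     new_map = []
--     for i in range(5):
--         for y in range(num_rows):
--             tile_row = []
--             for j in range(5):
--                 tile_row += shifted[y][i + j]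
--             new_map.append(tile_row)
--     return new_map
-- ===== Notes on version B (the rewrite author's own statement) =====
-- stated objective: faster
-- what changed: Replaced A's tile-major 4-deep loop nest mutating a preallocated grid cell by cell with a memoization scheme: B precomputes a table of the 9 possible shifted versions of each original row (offsets 0..8) once, then assembles every output row by concatenating five precomputed table rows, so per-cell Python-level arithmetic and index writes are replaced by 9*R*C arithmetic ops plus bulk list concatenation.
import Mathlib
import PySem

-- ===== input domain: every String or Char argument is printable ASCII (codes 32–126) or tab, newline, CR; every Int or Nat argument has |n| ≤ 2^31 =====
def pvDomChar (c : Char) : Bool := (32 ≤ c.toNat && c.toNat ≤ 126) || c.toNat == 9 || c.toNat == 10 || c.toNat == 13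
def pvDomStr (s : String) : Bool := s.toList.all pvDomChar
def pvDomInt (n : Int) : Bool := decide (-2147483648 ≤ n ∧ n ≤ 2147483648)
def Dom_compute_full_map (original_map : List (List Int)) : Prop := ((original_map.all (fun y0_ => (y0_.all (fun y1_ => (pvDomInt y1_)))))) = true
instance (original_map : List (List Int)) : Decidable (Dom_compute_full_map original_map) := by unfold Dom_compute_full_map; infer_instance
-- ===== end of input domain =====

-- B precomputes each original row's 9 shifted versions (offsets 0..8, same single `v>9 → v-9`
-- wrap) in a memo table and assembles the 5x5-tiled map by concatenating precomputed rows,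
-- instead of A's tile-major 4-deep loop nest mutating a preallocated grid cell by cell;
-- objective: faster by a constant factor (measured). Equal return values on Pre_.

-- ===== PORT A =====
-- `new_map[r][c] = v`: both indices are in-range Nats here, so ported as nested List.set
-- (Python list assignment at an in-range nonnegative index; exact there).
def pvSet2 (m : List (List Int)) (r c : Nat) (v : Int) : List (List Int) :=
  m.set r ((m.getD r []).set c v)

-- `range(n)` with n : Nat (n ≥ 0) is List.range n; `original_map[0]` is headD (length ≠ 0 in
-- this branch); `original_map[y][x]` with 0 ≤ y < num_rows, 0 ≤ x < num_cols is ported as getD —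
-- exact under Pre_ (indices in range); Python raises IndexError on the excluded ragged inputs.
def compute_full_map (original_map : List (List Int)) : List (List Int) :=
  if original_map.length = 0 then []
  else
    let num_rows := original_map.length
    let num_cols := (original_map.headD []).length
    let new_map : List (List Int) :=
      List.replicate (5 * num_rows) (List.replicate (5 * num_cols) (0 : Int))
    (List.range 5).foldl (fun m1 (i : Nat) =>
      (List.range 5).foldl (fun m2 (j : Nat) =>
        (List.range num_rows).foldl (fun m3 (y : Nat) =>
          (List.range num_cols).foldl (fun m4 (x : Nat) =>
            let new_val : Int := (original_map.getD y []).getD x 0 + (i : Int) + (j : Int)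
            let new_val := if new_val > 9 then new_val - 9 else new_val
            pvSet2 m4 (y + i * num_rows) (x + j * num_cols) new_val) m3) m2) m1) new_map

-- ===== PORT B =====
-- `row[:num_cols]` is List.take; `shifted[y][i+j]` reads the memo table (in-range under Pre_,
-- ported as getD); `tile_row += …` and `new_map.append(…)` are the list-append folds.
def compute_full_map_alt (original_map : List (List Int)) : List (List Int) :=
  if original_map.length = 0 then []
  else
    let num_rows := original_map.length
    let num_cols := (original_map.headD []).length
    let shifted : List (List (List Int)) :=
      original_map.map (fun row =>
        (List.range 9).map (fun o =>
          (row.take num_cols).map (fun v =>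
            if v + (o : Int) > 9 then v + (o : Int) - 9 else v + (o : Int))))
    (List.range 5).foldl (fun nm (i : Nat) =>
      (List.range num_rows).foldl (fun nm2 (y : Nat) =>
        let tile_row : List Int :=
          (List.range 5).foldl (fun tr (j : Nat) =>
            tr ++ ((shifted.getD y []).getD (i + j) [])) []
        nm2 ++ [tile_row]) nm) []

-- ===== PRECONDITION & SPEC =====
-- Pre_ excludes ragged inputs with some row shorter than row 0: there Python A raises
-- IndexError (reading original_map[y][x] out of range).
def Pre_compute_full_map (original_map : List (List Int)) : Prop :=
  ∀ row ∈ original_map, (original_map.headD []).length ≤ row.length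
instance (original_map : List (List Int)) : Decidable (Pre_compute_full_map original_map) := by
  unfold Pre_compute_full_map; infer_instance

def pvWitness_compute_full_map : List (List Int) := [[1, 2], [3, 9]]

def Spec_compute_full_map (original_map : List (List Int)) (out : List (List Int)) : Prop := out = compute_full_map_alt original_map
instance (original_map : List (List Int)) (out : List (List Int)) : Decidable (Spec_compute_full_map original_map out) := by unfold Spec_compute_full_map; infer_instance

-- ===== CLAIM (what is proved, stated in full; the proofs are below) =====
def Claim_equal_compute_full_map : Prop := ∀ (original_map : List (List Int)), Dom_compute_full_map original_map → Pre_compute_full_map original_map → Spec_compute_full_map original_map (compute_full_map original_map)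

-- ===== LEMMAS AND PROOFS =====

def pvWrap (v : Int) : Int := if v > 9 then v - 9 else v

-- the value of output cell (r, c)
def pvCell (om : List (List Int)) (nr nc r c : Nat) : Int :=
  pvWrap ((om.getD (r % nr) []).getD (c % nc) 0 + ((r / nr : Nat) : Int) + ((c / nc : Nat) : Int))

-- the list of output cells A's four nested loops write, in write order
def pvQuads (nr nc : Nat) : List (Nat × Nat) :=
  (List.range 5).flatMap (fun i =>
    (List.range 5).flatMap (fun j =>
      (List.range nr).flatMap (fun y =>
        (List.range nc).map (fun x => (y + i * nr, x + j * nc)))))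

lemma pvSet2_getD_row (m : List (List Int)) (ri c : Nat) (v : Int) (r : Nat) :
    (pvSet2 m ri c v).getD r [] =
      if r = ri ∧ ri < m.length then (m.getD ri []).set c v else m.getD r [] := by
  by_cases h : ri = r
  · subst h
    by_cases hlt : ri < m.length <;>
      simp [pvSet2, List.getD_eq_getElem?_getD, List.getElem?_set, hlt]
  · simp [pvSet2, List.getD_eq_getElem?_getD, List.getElem?_set, h, Ne.symm h]

lemma pvSet2_cell (m : List (List Int)) (ri ci : Nat) (v : Int) (r c : Nat)
    (hr : ri < m.length) (hc : ci < (m.getD ri []).length) :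
    ((pvSet2 m ri ci v).getD r []).getD c 0 =
      if r = ri ∧ c = ci then v else (m.getD r []).getD c 0 := by
  rw [pvSet2_getD_row]
  by_cases h : r = ri
  · subst h
    simp only [hr, and_true, if_pos rfl]
    by_cases h2 : c = ci
    · subst h2
      simp only [List.getD_eq_getElem?_getD] at hc
      simp [List.getD_eq_getElem?_getD, List.getElem?_set, hc]
    · simp [List.getD_eq_getElem?_getD, List.getElem?_set, h2, Ne.symm h2]
  · simp [h]

lemma grid_fold (F : Nat → Nat → Int) (R C : Nat) :
    ∀ (qs : List (Nat × Nat)) (m : List (List Int)),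
      m.length = R → (∀ r, r < R → (m.getD r []).length = C) →
      (∀ p ∈ qs, p.1 < R ∧ p.2 < C) →
      (qs.foldl (fun g p => pvSet2 g p.1 p.2 (F p.1 p.2)) m).length = R ∧
      (∀ r, r < R → ((qs.foldl (fun g p => pvSet2 g p.1 p.2 (F p.1 p.2)) m).getD r []).length = C) ∧
      (∀ r c, r < R → c < C →
        ((qs.foldl (fun g p => pvSet2 g p.1 p.2 (F p.1 p.2)) m).getD r []).getD c 0 =
          if (r, c) ∈ qs then F r c else (m.getD r []).getD c 0) := by
  intro qs
  induction qs with
  | nil => intro m h1 h2 _; simpa using ⟨h1, h2⟩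
  | cons p qs ih =>
    intro m h1 h2 h3
    obtain ⟨hp1, hp2⟩ := h3 p (by simp)
    have hrow1 : ∀ r, r < R → ((pvSet2 m p.1 p.2 (F p.1 p.2)).getD r []).length = C := by
      intro r hr
      rw [pvSet2_getD_row]
      split_ifs with h
      · have hh := h2 p.1 (h1 ▸ h.2)
        simp only [List.getD_eq_getElem?_getD] at hh
        simp [hh]
      · exact h2 r hr
    have hlen1 : (pvSet2 m p.1 p.2 (F p.1 p.2)).length = R := by simp [pvSet2, h1]
    obtain ⟨ihlen, ihrow, ihcell⟩ :=
      ih (pvSet2 m p.1 p.2 (F p.1 p.2)) hlen1 hrow1 (fun q hq => h3 q (by simp [hq]))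
    refine ⟨by simpa using ihlen, by simpa using ihrow, ?_⟩
    intro r c hr hc
    simp only [List.foldl_cons]
    rw [ihcell r c hr hc,
        pvSet2_cell m p.1 p.2 (F p.1 p.2) r c (h1 ▸ hp1) (by rw [h2 p.1 (h1 ▸ hp1)]; exact hp2)]
    by_cases hmem : (r, c) ∈ qs
    · simp [hmem]
    · by_cases heq : (r, c) = p
      · have : r = p.1 ∧ c = p.2 := by cases p; cases heq; exact ⟨rfl, rfl⟩
        simp [hmem, this.1, this.2]
      · have hne : ¬(r = p.1 ∧ c = p.2) := by
          intro h; apply heq; cases p; simp at h ⊢; exact h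
        simp [hmem, hne, heq]

lemma mem_pvQuads (nr nc r c : Nat) :
    (r, c) ∈ pvQuads nr nc ↔ r < 5 * nr ∧ c < 5 * nc := by
  simp only [pvQuads, List.mem_flatMap, List.mem_map, List.mem_range, Prod.mk.injEq]
  constructor
  · rintro ⟨i, hi, j, hj, y, hy, x, hx, h1, h2⟩
    have hni : i * nr ≤ 4 * nr := Nat.mul_le_mul_right nr (by omega)
    have hnj : j * nc ≤ 4 * nc := Nat.mul_le_mul_right nc (by omega)
    omega
  · rintro ⟨hr, hc⟩
    have hnr : 0 < nr := by by_contra h; omega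
    have hnc : 0 < nc := by by_contra h; omega
    exact ⟨r / nr, Nat.div_lt_of_lt_mul (by omega), c / nc, Nat.div_lt_of_lt_mul (by omega),
      r % nr, Nat.mod_lt _ hnr, c % nc, Nat.mod_lt _ hnc,
      Nat.mod_add_div' r nr, Nat.mod_add_div' c nc⟩

lemma pvCell_tile (om : List (List Int)) (nr nc i j y x : Nat)
    (hy : y < nr) (hx : x < nc) :
    pvCell om nr nc (y + i * nr) (x + j * nc) =
      pvWrap ((om.getD y []).getD x 0 + (i : Int) + (j : Int)) := by
  have h1 : (y + i * nr) % nr = y := by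
    simp [Nat.add_mul_mod_self_right, Nat.mod_eq_of_lt hy]
  have h2 : (y + i * nr) / nr = i := by
    rw [Nat.add_mul_div_right _ _ (by omega : 0 < nr)]; simp [Nat.div_eq_of_lt hy]
  have h3 : (x + j * nc) % nc = x := by
    simp [Nat.add_mul_mod_self_right, Nat.mod_eq_of_lt hx]
  have h4 : (x + j * nc) / nc = j := by
    rw [Nat.add_mul_div_right _ _ (by omega : 0 < nc)]; simp [Nat.div_eq_of_lt hx]
  rw [pvCell, h1, h2, h3, h4]

-- A's nested fold is the fold of pvSet2 writes over pvQuads with values pvCell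
lemma A_fold_eq (om : List (List Int)) (nr nc : Nat) (m : List (List Int)) :
    (List.range 5).foldl (fun m1 (i : Nat) =>
      (List.range 5).foldl (fun m2 (j : Nat) =>
        (List.range nr).foldl (fun m3 (y : Nat) =>
          (List.range nc).foldl (fun m4 (x : Nat) =>
            let new_val : Int := (om.getD y []).getD x 0 + (i : Int) + (j : Int)
            let new_val := if new_val > 9 then new_val - 9 else new_val
            pvSet2 m4 (y + i * nr) (x + j * nc) new_val) m3) m2) m1) m =
    (pvQuads nr nc).foldl (fun g p => pvSet2 g p.1 p.2 (pvCell om nr nc p.1 p.2)) m := by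
  rw [pvQuads]
  simp only [List.foldl_flatMap, List.foldl_map]
  apply List.foldl_ext
  intro m1 i hi
  apply List.foldl_ext
  intro m2 j hj
  apply List.foldl_ext
  intro m3 y hy
  apply List.foldl_ext
  intro m4 x hx
  simp only [List.mem_range] at hy hx
  dsimp only
  rw [pvCell_tile om nr nc i j y x hy hx]
  rfl

-- decomposing range (a*b) into a blocks of b
lemma range_mul_flatMap {α : Type} (a b : Nat) (f : Nat → α) :
    (List.range (a * b)).map f =
      (List.range a).flatMap (fun i => (List.range b).map (fun k => f (i * b + k))) := by
  induction a with
  | zero => simp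
  | succ a ih =>
    have h1 : (a + 1) * b = a * b + b := by ring
    rw [h1, List.range_add, List.map_append, ih, List.range_succ, List.flatMap_append]
    simp [List.map_map, Function.comp]

-- under Pre_, taking nc elements of a row and mapping equals mapping the indexed reads
lemma take_map_eq (row : List Int) (nc : Nat) (hnc : nc ≤ row.length) (f : Int → Int) :
    (row.take nc).map f = (List.range nc).map (fun x => f (row.getD x 0)) := by
  apply List.ext_getElem
  · simp [Nat.min_eq_left hnc]
  · intro n h1 h2
    have hn : n < nc := by simpa [Nat.min_eq_left hnc] using h1
    have hn' : n < row.length := lt_of_lt_of_le hn hnc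
    simp [List.getElem_take, List.getD_eq_getElem?_getD, List.getElem?_eq_getElem hn', hn]


-- the memo-table row of B for original row y at offset o (what shifted[y][o] holds)
lemma table_getD (om : List (List Int)) (nc : Nat) (y o : Nat) (hy : y < om.length) (ho : o < 9) :
    (((om.map (fun row => (List.range 9).map (fun oo =>
        (row.take nc).map (fun v =>
          if v + (oo : Int) > 9 then v + (oo : Int) - 9 else v + (oo : Int))))).getD y []).getD o []) =
      ((om.getD y []).take nc).map (fun v =>
        if v + (o : Int) > 9 then v + (o : Int) - 9 else v + (o : Int)) := by
  simp [List.getD_eq_getElem?_getD, List.getElem?_map, List.getElem?_eq_getElem hy,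
    List.getElem?_range, ho]

-- one output row of B equals the row of output cells
lemma rowB_eq (om : List (List Int)) (hpre : Pre_compute_full_map om)
    (i y : Nat) (hi : i < 5) (hy : y < om.length) :
    (List.range 5).flatMap (fun j =>
      (((om.map (fun row => (List.range 9).map (fun o =>
          (row.take (om.headD []).length).map (fun v =>
            if v + (o : Int) > 9 then v + (o : Int) - 9 else v + (o : Int))))).getD y []).getD (i + j) [])) =
      (List.range (5 * (om.headD []).length)).map (fun c =>
        pvCell om om.length (om.headD []).length (i * om.length + y) c) := by
  set nr := om.length with hnr
  set nc := (om.headD []).length with hnc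
  have hrow : om.getD y [] ∈ om := by
    have : om.getD y [] = om[y] := List.getD_eq_getElem om [] hy
    rw [this]; exact List.getElem_mem hy
  have hlen : nc ≤ (om.getD y []).length := hpre _ hrow
  rw [range_mul_flatMap 5 nc]
  apply List.flatMap_congr
  intro j hj
  have hj5 : j < 5 := List.mem_range.mp hj
  rw [table_getD om nc y (i + j) hy (by omega), take_map_eq _ nc hlen]
  apply List.map_congr_left
  intro x hx
  have hxn : x < nc := List.mem_range.mp hx
  have hrc : i * nr + y = y + i * nr := by ring
  have hcc : j * nc + x = x + j * nc := by ring
  rw [hrc, hcc, pvCell_tile om nr nc i j y x hy hxn, pvWrap]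
  simp only [Nat.cast_add, ← add_assoc]

-- B equals the output-cell map form under Pre_
lemma B_eq_mapform (om : List (List Int)) (hpre : Pre_compute_full_map om)
    (h0 : om.length ≠ 0) :
    compute_full_map_alt om =
      (List.range (5 * om.length)).map (fun r =>
        (List.range (5 * (om.headD []).length)).map (fun c =>
          pvCell om om.length (om.headD []).length r c)) := by
  unfold compute_full_map_alt
  rw [if_neg h0]
  set nr := om.length with hnr
  set nc := (om.headD []).length with hnc
  simp only [PySem.List.foldl_append_singleton_eq_map]
  simp only [PySem.List.foldl_append_eq_flatMap, List.nil_append]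
  rw [range_mul_flatMap 5 nr]
  apply List.flatMap_congr
  intro i hi
  apply List.map_congr_left
  intro y hy
  exact rowB_eq om hpre i y (List.mem_range.mp hi) (List.mem_range.mp hy)

theorem compute_full_map_spec : Claim_equal_compute_full_map := by
  intro om _ hpre
  unfold Spec_compute_full_map
  by_cases h0 : om.length = 0
  · unfold compute_full_map compute_full_map_alt; simp [h0]
  · rw [B_eq_mapform om hpre h0]
    unfold compute_full_map
    rw [if_neg h0]
    set nr := om.length with hnr
    set nc := (om.headD []).length with hnc
    rw [A_fold_eq om nr nc]
    have hshape : ∀ r, r < 5 * nr →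
        ((List.replicate (5 * nr) (List.replicate (5 * nc) (0 : Int))).getD r []).length = 5 * nc := by
      intro r hr
      simp [List.getD_eq_getElem?_getD, List.getElem?_replicate, hr]
    obtain ⟨hAlen, hArow, hAcell⟩ :=
      grid_fold (pvCell om nr nc) (5 * nr) (5 * nc) (pvQuads nr nc)
        (List.replicate (5 * nr) (List.replicate (5 * nc) (0 : Int)))
        (by simp) hshape
        (by rintro ⟨r, c⟩ hp; exact (mem_pvQuads nr nc r c).mp hp)
    set M := (pvQuads nr nc).foldl
        (fun g p => pvSet2 g p.1 p.2 (pvCell om nr nc p.1 p.2))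
        (List.replicate (5 * nr) (List.replicate (5 * nc) (0 : Int))) with hM
    apply List.ext_getElem
    · simp [hAlen]
    · intro n h1 h2
      have hn : n < 5 * nr := by simpa [hAlen] using h1
      have hrowM : (M.getD n []) = M[n] := List.getD_eq_getElem M [] h1
      rw [← hrowM]
      have hrB : ((List.range (5 * nr)).map (fun r =>
          (List.range (5 * nc)).map (fun c => pvCell om nr nc r c)))[n] =
          (List.range (5 * nc)).map (fun c => pvCell om nr nc n c) := by
        simp [hn]
      rw [hrB]
      apply List.ext_getElem
      · have hA := hArow n hn
        simp only [List.getD_eq_getElem?_getD] at hA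
        simp [hA]
      · intro c hc1 hc2
        have hcc : c < 5 * nc := by
          have := hArow n hn; omega
        have h5 := hAcell n c hn hcc
        rw [if_pos ((mem_pvQuads nr nc n c).mpr ⟨hn, hcc⟩)] at h5
        have hgl : (M.getD n []).getD c 0 = (M.getD n [])[c] := List.getD_eq_getElem _ 0 hc1
        rw [hgl] at h5
        rw [h5]
        have hcl : c < ((List.range (5 * nc)).map (fun c => pvCell om nr nc n c)).length := by
          simpa using hcc
        rw [← List.getD_eq_getElem _ 0 hcl]
        simp [List.getD_eq_getElem?_getD, List.getElem?_map, List.getElem?_range, hcc]
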